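-- pv_equiv track=rewrite | github.com/kavind950/cricbuzz_livestats | utils/load_players.py | _find_format_index
-- ===== SOURCE A (Python) =====
-- from typing import Dict, Any, List, Optional
--
-- FORMAT_PREFERENCE = ["ODI", "ODIs", "One Day", "T20I", "T20", "TESTS", "TEST", "Tests", "Test", "IPL"]
--
-- def _find_format_index(headers: List[str]) -> Optional[int]:
--     """
--     headers example: ["ROWHEADER", "Test", "ODI", "T20", "IPL"]
--     Return index of preferred format. Allow substring matches (t20i vs t20).
--     """
--     if not isinstance(headers, list) or not headers:
--         return None
--     lowered = [h.lower() for h in headers]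
--
--     def non_row():
--         return [i for i, h in enumerate(lowered) if h != "rowheader"]
--
--     for want in FORMAT_PREFERENCE:
--         wl = want.lower()
--         for i, h in enumerate(lowered):
--             if h == "rowheader":
--                 continue
--             if wl == h or wl in h or h in wl:
--                 return i
--     inds = non_row()
--     return inds[0] if inds else None
-- ===== SOURCE B (Python) =====
-- from typing import List, Optional
--
-- FORMAT_PREFERENCE = ["ODI", "ODIs", "One Day", "T20I", "T20", "TESTS", "TEST", "Tests", "Test", "IPL"]
--
-- def _find_format_index(headers: List[str]) -> Optional[int]:
--     """One pass over headers keeping the best (lowest) preference rank; leftmost wins ties."""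
--     if not isinstance(headers, list) or not headers:
--         return None
--     INF = len(FORMAT_PREFERENCE)
--     lowered_prefs = [w.lower() for w in FORMAT_PREFERENCE]
--     best_rank = INF + 1
--     best_i = None
--     for i, h in enumerate(headers):
--         hl = h.lower()
--         if hl == "rowheader":
--             continue
--         rank = INF
--         for r, wl in enumerate(lowered_prefs):
--             if wl == hl or wl in hl or hl in wl:
--                 rank = r
--                 break
--         if rank < best_rank:
--             best_rank = rank
--             best_i = i
--     return best_i
-- ===== Notes on version B (the rewrite author's own statement) =====
-- stated objective: alternative
-- what changed: A scans all headers once per preference (format-outer nested search plus a separate fallback pass); B makes a single left-to-right pass over headers keeping the best (lowest) preference rank with strict-< updates so the leftmost header wins ties, the rank INF covering A's non-rowheader fallback.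
import Mathlib
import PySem

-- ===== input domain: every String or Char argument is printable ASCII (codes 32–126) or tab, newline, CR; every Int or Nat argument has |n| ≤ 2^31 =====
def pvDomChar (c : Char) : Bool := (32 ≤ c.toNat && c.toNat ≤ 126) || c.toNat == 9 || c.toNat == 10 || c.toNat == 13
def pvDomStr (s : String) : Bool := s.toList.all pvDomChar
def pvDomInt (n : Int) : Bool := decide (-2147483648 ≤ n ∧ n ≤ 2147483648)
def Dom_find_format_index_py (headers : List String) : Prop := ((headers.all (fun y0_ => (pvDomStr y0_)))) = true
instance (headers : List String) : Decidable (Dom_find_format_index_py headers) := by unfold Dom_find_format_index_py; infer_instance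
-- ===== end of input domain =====

-- B is an alternative single-pass decomposition (best-rank scan) of A's nested format-first search; equal cost, no speed claim.

-- ===== PORT A =====
def pvFormatPreferenceA : List String := ["ODI", "ODIs", "One Day", "T20I", "T20", "TESTS", "TEST", "Tests", "Test", "IPL"]

def pvMatchA (wl h : String) : Bool := wl == h || PySem.Str.isIn wl h || PySem.Str.isIn h wl

-- inner 'for i, h in enumerate(lowered)' loop of A
def pvInnerA (wl : String) : List (Int × String) → Option Int
  | [] => none
  | (i, h) :: rest =>
      if h == "rowheader" then pvInnerA wl rest
      else if pvMatchA wl h then some i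
      else pvInnerA wl rest

-- outer 'for want in FORMAT_PREFERENCE' loop of A
def pvOuterA (prefs : List String) (litems : List (Int × String)) : Option Int :=
  match prefs with
  | [] => none
  | w :: ws =>
      match pvInnerA (PySem.Str.lower w) litems with
      | some i => some i
      | none => pvOuterA ws litems

def find_format_index_py (headers : List String) : Option Int :=
  if headers.isEmpty then none
  else
    let lowered := headers.map PySem.Str.lower
    let litems := PySem.List.enumerate lowered 0
    match pvOuterA pvFormatPreferenceA litems with
    | some i => some i
    | none =>
        -- inds = non_row(); return inds[0] if inds else None
        match (litems.filter (fun p => !(p.2 == "rowheader"))).head? with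
        | some p => some p.1
        | none => none

-- ===== PORT B =====
def pvFormatPreferenceB : List String := ["ODI", "ODIs", "One Day", "T20I", "T20", "TESTS", "TEST", "Tests", "Test", "IPL"]

def pvMatchB (wl hl : String) : Bool := wl == hl || PySem.Str.isIn wl hl || PySem.Str.isIn hl wl

-- 'for r, wl in enumerate(lowered_prefs): … break' loop of B
def pvRankGoB (hl : String) : List (Int × String) → Int
  | [] => 10     -- rank stays INF = len(FORMAT_PREFERENCE)
  | (r, wl) :: rest => if pvMatchB wl hl then r else pvRankGoB hl rest

def pvRankB (hl : String) : Int :=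
  pvRankGoB hl (PySem.List.enumerate (pvFormatPreferenceB.map PySem.Str.lower) 0)

-- 'for i, h in enumerate(headers)' best-rank scan of B
def pvScanB : List (Int × String) → Int → Option Int → Option Int
  | [], _, best_i => best_i
  | (i, h) :: rest, best_rank, best_i =>
      let hl := PySem.Str.lower h
      if hl == "rowheader" then pvScanB rest best_rank best_i
      else
        let rank := pvRankB hl
        if rank < best_rank then pvScanB rest rank (some i)
        else pvScanB rest best_rank best_i

def find_format_index_py_alt (headers : List String) : Option Int :=
  if headers.isEmpty then none
  else pvScanB (PySem.List.enumerate headers 0) 11 none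

-- ===== PRECONDITION & SPEC =====
def Spec_find_format_index_py (headers : List String) (out : Option Int) : Prop := out = find_format_index_py_alt headers
instance (headers : List String) (out : Option Int) : Decidable (Spec_find_format_index_py headers out) := by unfold Spec_find_format_index_py; infer_instance

-- ===== CLAIM (what is proved, stated in full; the proofs are below) =====
def Claim_equal_find_format_index_py : Prop := ∀ (headers : List String), Dom_find_format_index_py headers → Spec_find_format_index_py headers (find_format_index_py headers)

-- ===== LEMMAS AND PROOFS =====

-- lowered-second-component view of an enumerated list
def pvLowerSnd (p : Int × String) : Int × String := (p.1, PySem.Str.lower p.2)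

-- minimum-rank scan specification objects (proof-side only)
def pvAmGo : List (Int × Int) → (Int × Int) → Int
  | [], b => b.2
  | q :: rest, b => if q.1 < b.1 then pvAmGo rest q else pvAmGo rest b

def pvArgminF : List (Int × Int) → Option Int
  | [] => none
  | q :: rest => some (pvAmGo rest q)

def pvShift (cs : List (Int × Int)) : List (Int × Int) := cs.map (fun q => (q.1 + 1, q.2))

-- candidates with their rank relative to a pref list (matched items only)
def pvCandsSome (prefs : List String) (litems : List (Int × String)) : List (Int × Int) :=
  litems.filterMap (fun p =>
    if p.2 == "rowheader" then none
    else (List.findIdx? (fun w => pvMatchA (PySem.Str.lower w) p.2) prefs).map (fun r => ((r : Int), p.1)))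

-- all non-rowheader items with B's rank (10 = unmatched)
def pvCandsAll (items : List (Int × String)) : List (Int × Int) :=
  items.filterMap (fun p =>
    let hl := PySem.Str.lower p.2
    if hl == "rowheader" then none else some (pvRankB hl, p.1))

-- abstract form of B's scan over candidates
def pvScanC : List (Int × Int) → Int → Option Int → Option Int
  | [], _, bi => bi
  | q :: cs, br, bi => if q.1 < br then pvScanC cs q.1 (some q.2) else pvScanC cs br bi

theorem pvLower_enumerate (hs : List String) (s : Int) :
    PySem.List.enumerate (hs.map PySem.Str.lower) s = (PySem.List.enumerate hs s).map pvLowerSnd := by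
  induction hs generalizing s with
  | nil => rfl
  | cons h t ih => simp [PySem.List.enumerate_cons, ih, pvLowerSnd]

theorem pvRankGoB_enum (ws : List String) (s : Int) (hl : String) :
    pvRankGoB hl (PySem.List.enumerate (ws.map PySem.Str.lower) s) =
      (match List.findIdx? (fun w => pvMatchB (PySem.Str.lower w) hl) ws with
       | some r => s + (r : Int)
       | none => 10) := by
  induction ws generalizing s with
  | nil => rfl
  | cons w t ih =>
      simp only [List.map_cons, PySem.List.enumerate_cons, pvRankGoB, List.findIdx?_cons]
      by_cases hm : pvMatchB (PySem.Str.lower w) hl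
      · simp [hm]
      · simp only [hm, Bool.false_eq_true, if_false, ih]
        cases hfi : List.findIdx? (fun w => pvMatchB (PySem.Str.lower w) hl) t with
        | none => simp
        | some r => simp only [Option.map_some]; push_cast; ring

theorem pvRankB_eq (hl : String) :
    pvRankB hl = (match List.findIdx? (fun w => pvMatchA (PySem.Str.lower w) hl) pvFormatPreferenceA with
                  | some r => (r : Int)
                  | none => 10) := by
  have h := pvRankGoB_enum pvFormatPreferenceB 0 hl
  have hAB : pvMatchA = pvMatchB := rfl
  have hFP : pvFormatPreferenceA = pvFormatPreferenceB := rfl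
  rw [pvRankB, h, hAB, hFP]
  cases List.findIdx? (fun w => pvMatchB (PySem.Str.lower w) hl) pvFormatPreferenceB <;> simp

theorem pvRankB_bounds (hl : String) : 0 ≤ pvRankB hl ∧ pvRankB hl ≤ 10 := by
  rw [pvRankB_eq]
  cases hfi : List.findIdx? (fun w => pvMatchA (PySem.Str.lower w) hl) pvFormatPreferenceA with
  | none => simp
  | some r =>
      have hr := (List.findIdx?_eq_some_iff_findIdx_eq.mp hfi).1
      simp only []
      constructor
      · positivity
      · have : r < 10 := by simpa [pvFormatPreferenceA] using hr
        omega

theorem pvCandsAll_bounds (items : List (Int × String)) :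
    ∀ q ∈ pvCandsAll items, 0 ≤ q.1 ∧ q.1 ≤ 10 := by
  intro q hq
  simp only [pvCandsAll, List.mem_filterMap] at hq
  obtain ⟨p, _, hp⟩ := hq
  by_cases hrow : PySem.Str.lower p.2 == "rowheader"
  · simp [hrow] at hp
  · simp only [hrow, Bool.false_eq_true, if_false, Option.some.injEq] at hp
    have := pvRankB_bounds (PySem.Str.lower p.2)
    rw [← hp]; exact this

theorem pvScanB_eq_scanC (items : List (Int × String)) (br : Int) (bi : Option Int) :
    pvScanB items br bi = pvScanC (pvCandsAll items) br bi := by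
  induction items generalizing br bi with
  | nil => rfl
  | cons p t ih =>
      obtain ⟨i, h⟩ := p
      by_cases hrow : PySem.Str.lower h == "rowheader"
      · have hrow' : PySem.Str.lower h = "rowheader" := by simpa using hrow
        rw [show pvCandsAll ((i, h) :: t) = pvCandsAll t from by
          simp [pvCandsAll, hrow']]
        simpa [pvScanB, hrow] using ih br bi
      · have hrow' : ¬ PySem.Str.lower h = "rowheader" := by simpa using hrow
        rw [show pvCandsAll ((i, h) :: t) = (pvRankB (PySem.Str.lower h), i) :: pvCandsAll t from by
          simp [pvCandsAll, hrow']]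
        rw [pvScanC]
        by_cases hlt : pvRankB (PySem.Str.lower h) < br
        · simpa [pvScanB, hrow, hlt] using ih (pvRankB (PySem.Str.lower h)) (some i)
        · simpa [pvScanB, hrow, hlt] using ih br bi

theorem pvScanC_amGo (cs : List (Int × Int)) (b : Int × Int) :
    pvScanC cs b.1 (some b.2) = some (pvAmGo cs b) := by
  induction cs generalizing b with
  | nil => rfl
  | cons q t ih =>
      simp only [pvScanC, pvAmGo]
      by_cases hlt : q.1 < b.1
      · simp [hlt, ih q]
      · simp [hlt, ih b]

theorem pvAmGo_zero (cs : List (Int × Int)) (b : Int × Int)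
    (hnn : ∀ q ∈ cs, 0 ≤ q.1) (hb : b.1 = 0) : pvAmGo cs b = b.2 := by
  induction cs generalizing b with
  | nil => rfl
  | cons q t ih =>
      have hq : ¬ q.1 < b.1 := by have := hnn q (by simp); omega
      simp only [pvAmGo, hq, if_false]
      exact ih b (fun r hr => hnn r (List.mem_cons_of_mem _ hr)) hb

theorem pvAmGo_first_zero (cs : List (Int × Int)) (b z : Int × Int)
    (hnn : ∀ q ∈ cs, 0 ≤ q.1) (hb : 0 < b.1)
    (hf : cs.find? (fun q => q.1 == 0) = some z) : pvAmGo cs b = z.2 := by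
  induction cs generalizing b with
  | nil => simp at hf
  | cons q t ih =>
      by_cases hq0 : q.1 = 0
      · have hz : q = z := by simpa [List.find?_cons, hq0] using hf
        have hlt : q.1 < b.1 := by omega
        simp only [pvAmGo, hlt, if_true]
        rw [pvAmGo_zero t q (fun r hr => hnn r (List.mem_cons_of_mem _ hr)) hq0, hz]
      · have hf' : t.find? (fun q => q.1 == 0) = some z := by
          simpa [List.find?_cons, hq0] using hf
        have hnn' : ∀ r ∈ t, 0 ≤ r.1 := fun r hr => hnn r (List.mem_cons_of_mem _ hr)
        simp only [pvAmGo]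
        by_cases hlt : q.1 < b.1
        · simp only [hlt, if_true]
          exact ih q hnn' (by have := hnn q (by simp); omega) hf'
        · simp only [hlt, if_false]
          exact ih b hnn' hb hf'

theorem pvArgminF_first_zero (cs : List (Int × Int)) (z : Int × Int)
    (hnn : ∀ q ∈ cs, 0 ≤ q.1)
    (hf : cs.find? (fun q => q.1 == 0) = some z) : pvArgminF cs = some z.2 := by
  cases cs with
  | nil => simp at hf
  | cons q t =>
      have hnn' : ∀ r ∈ t, 0 ≤ r.1 := fun r hr => hnn r (by simp [hr])
      by_cases hq0 : q.1 = 0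
      · have hz : z = q := by
          simp only [List.find?_cons, hq0] at hf
          simpa using hf.symm
        rw [pvArgminF, pvAmGo_zero t q hnn' hq0, hz]
      · have hf' : t.find? (fun q => q.1 == 0) = some z := by
          simpa [List.find?_cons, hq0] using hf
        have hq0' : 0 < q.1 := by have := hnn q (by simp); omega
        rw [pvArgminF, pvAmGo_first_zero t q z hnn' hq0' hf']

theorem pvAmGo_shift (cs : List (Int × Int)) (b : Int × Int) :
    pvAmGo (pvShift cs) (b.1 + 1, b.2) = pvAmGo cs b := by
  induction cs generalizing b with
  | nil => rfl
  | cons q t ih =>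
      simp only [pvShift, List.map_cons, pvAmGo]
      by_cases hlt : q.1 < b.1
      · have : q.1 + 1 < b.1 + 1 := by omega
        simp only [this, if_true, hlt, if_true]
        exact ih q
      · have : ¬ q.1 + 1 < b.1 + 1 := by omega
        simp only [this, if_false, hlt, if_false]
        exact ih b

theorem pvArgminF_shift (cs : List (Int × Int)) : pvArgminF (pvShift cs) = pvArgminF cs := by
  cases cs with
  | nil => rfl
  | cons q t =>
      simp only [pvShift, List.map_cons, pvArgminF]
      rw [show ((q.1 + 1, q.2) : Int × Int) = (q.1 + 1, q.2) from rfl, ← pvShift]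
      exact congrArg some (pvAmGo_shift t q)

theorem pvAmGo_filter (cs : List (Int × Int)) (b : Int × Int)
    (hub : ∀ q ∈ cs, q.1 ≤ 10) (hb : b.1 ≤ 9) :
    pvAmGo (cs.filter (fun q => decide (q.1 ≤ 9))) b = pvAmGo cs b := by
  induction cs generalizing b with
  | nil => rfl
  | cons q t ih =>
      have hub' : ∀ r ∈ t, r.1 ≤ 10 := fun r hr => hub r (by simp [hr])
      by_cases hq : q.1 ≤ 9
      · simp only [List.filter_cons, hq, decide_true, if_true, pvAmGo]
        by_cases hlt : q.1 < b.1
        · simp only [hlt, if_true]; exact ih q hub' hq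
        · simp only [hlt, if_false]; exact ih b hub' hb
      · have hq10 : ¬ q.1 < b.1 := by omega
        simp only [List.filter_cons, hq, decide_false, if_false, pvAmGo, hq10, Bool.false_eq_true]
        exact ih b hub' hb

theorem pvAmGo_ten (cs : List (Int × Int)) (b : Int × Int)
    (hbd : ∀ q ∈ cs, 0 ≤ q.1 ∧ q.1 ≤ 10) (hb : b.1 = 10) :
    pvAmGo cs b = (match cs.filter (fun q => decide (q.1 ≤ 9)) with
                   | [] => b.2
                   | c :: r => pvAmGo r c) := by
  induction cs generalizing b with
  | nil => rfl
  | cons q t ih =>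
      have hbd' : ∀ r ∈ t, 0 ≤ r.1 ∧ r.1 ≤ 10 := fun r hr => hbd r (by simp [hr])
      by_cases hq : q.1 ≤ 9
      · have hlt : q.1 < b.1 := by omega
        simp only [pvAmGo, hlt, if_true, List.filter_cons, hq, decide_true]
        have hub' : ∀ r ∈ t, r.1 ≤ 10 := fun r hr => (hbd' r hr).2
        exact (pvAmGo_filter t q hub' hq).symm
      · have h10 : q.1 = 10 := by have := hbd q (by simp); omega
        have hlt : ¬ q.1 < b.1 := by omega
        simp only [pvAmGo, hlt, if_false, List.filter_cons, hq, decide_false, Bool.false_eq_true]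
        exact ih b hbd' hb

theorem pvMain (cs : List (Int × Int)) (hbd : ∀ q ∈ cs, 0 ≤ q.1 ∧ q.1 ≤ 10) :
    (match pvArgminF (cs.filter (fun q => decide (q.1 ≤ 9))) with
     | some i => some i
     | none => cs.head?.map (fun q => q.2)) = pvArgminF cs := by
  cases cs with
  | nil => rfl
  | cons q t =>
      have hbd' : ∀ r ∈ t, 0 ≤ r.1 ∧ r.1 ≤ 10 := fun r hr => hbd r (by simp [hr])
      have hub' : ∀ r ∈ t, r.1 ≤ 10 := fun r hr => (hbd' r hr).2
      by_cases hq : q.1 ≤ 9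
      · simp only [List.filter_cons, hq, decide_true, if_true, pvArgminF]
        rw [pvAmGo_filter t q hub' hq]
      · have h10 : q.1 = 10 := by have := hbd q (by simp); omega
        simp only [List.filter_cons, hq, decide_false, if_false, pvArgminF, Bool.false_eq_true]
        rw [pvAmGo_ten t q hbd' h10]
        cases t.filter (fun q => decide (q.1 ≤ 9)) with
        | nil => simp [pvArgminF]
        | cons c r => simp [pvArgminF]

-- A's inner loop is find-first
theorem pvInnerA_eq_find? (wl : String) (litems : List (Int × String)) :
    pvInnerA wl litems =
      (litems.find? (fun p => !(p.2 == "rowheader") && pvMatchA wl p.2)).map (fun p => p.1) := by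
  induction litems with
  | nil => rfl
  | cons p t ih =>
      by_cases hrow : p.2 == "rowheader"
      · simp [pvInnerA, hrow, ih]
      · by_cases hm : pvMatchA wl p.2
        · simp [pvInnerA, hrow, hm]
        · simp [pvInnerA, hrow, hm, ih]

theorem pvCandsSome_nil (litems : List (Int × String)) : pvCandsSome [] litems = [] := by
  induction litems with
  | nil => rfl
  | cons p t ih => by_cases hrow : p.2 == "rowheader" <;> simp [pvCandsSome, List.filterMap_cons, hrow] <;> simpa [pvCandsSome] using ih

theorem pvCandsSome_cons_row (prefs : List String) (p : Int × String) (t : List (Int × String))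
    (hrow : p.2 = "rowheader") :
    pvCandsSome prefs (p :: t) = pvCandsSome prefs t := by
  simp [pvCandsSome, hrow]

theorem pvCandsSome_cons_match (prefs : List String) (p : Int × String) (t : List (Int × String))
    (r : Nat) (hrow : ¬ p.2 = "rowheader")
    (hfi : List.findIdx? (fun w => pvMatchA (PySem.Str.lower w) p.2) prefs = some r) :
    pvCandsSome prefs (p :: t) = ((r : Int), p.1) :: pvCandsSome prefs t := by
  simp [pvCandsSome, hrow, hfi]

theorem pvCandsSome_cons_nomatch (prefs : List String) (p : Int × String) (t : List (Int × String))
    (hrow : ¬ p.2 = "rowheader")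
    (hfi : List.findIdx? (fun w => pvMatchA (PySem.Str.lower w) p.2) prefs = none) :
    pvCandsSome prefs (p :: t) = pvCandsSome prefs t := by
  simp [pvCandsSome, hrow, hfi]

theorem pvCandsAll_cons_row (p : Int × String) (t : List (Int × String))
    (hrow : PySem.Str.lower p.2 = "rowheader") :
    pvCandsAll (p :: t) = pvCandsAll t := by
  simp [pvCandsAll, hrow]

theorem pvCandsAll_cons (p : Int × String) (t : List (Int × String))
    (hrow : ¬ PySem.Str.lower p.2 = "rowheader") :
    pvCandsAll (p :: t) = (pvRankB (PySem.Str.lower p.2), p.1) :: pvCandsAll t := by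
  simp [pvCandsAll, hrow]

theorem pvCandsSome_nonneg (prefs : List String) (litems : List (Int × String)) :
    ∀ q ∈ pvCandsSome prefs litems, 0 ≤ q.1 := by
  intro q hq
  simp only [pvCandsSome, List.mem_filterMap] at hq
  obtain ⟨p, -, hp⟩ := hq
  by_cases hrow : p.2 == "rowheader"
  · simp [hrow] at hp
  · simp only [hrow, Bool.false_eq_true, if_false] at hp
    cases hfi : List.findIdx? (fun w => pvMatchA (PySem.Str.lower w) p.2) prefs with
    | none => rw [hfi] at hp; exact absurd hp (by simp)
    | some r =>
        rw [hfi] at hp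
        simp at hp
        have h0 : (0 : Int) ≤ (((r : Int), p.1) : Int × Int).1 := Int.natCast_nonneg r
        rwa [hp] at h0

-- the rank-0 candidates of (w :: ws) are exactly the matches of w, first one included
theorem pvCandsSome_find_zero (w : String) (ws : List String) (litems : List (Int × String))
    (z : Int × String)
    (hf : litems.find? (fun p => !(p.2 == "rowheader") && pvMatchA (PySem.Str.lower w) p.2) = some z) :
    (pvCandsSome (w :: ws) litems).find? (fun q => q.1 == 0) = some (0, z.1) := by
  induction litems with
  | nil => simp at hf
  | cons p t ih =>
      by_cases hrow : p.2 = "rowheader"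
      · have hf' := by simpa [List.find?_cons, hrow] using hf
        rw [pvCandsSome_cons_row _ _ _ hrow]
        exact ih hf'
      · by_cases hm : pvMatchA (PySem.Str.lower w) p.2
        · have hz : z = p := by simpa [List.find?_cons, hrow, hm] using hf.symm
          have hfi : List.findIdx? (fun w' => pvMatchA (PySem.Str.lower w') p.2) (w :: ws) = some 0 := by
            simp [List.findIdx?_cons, hm]
          rw [pvCandsSome_cons_match _ _ _ 0 hrow hfi]
          simp [hz]
        · have hf' : t.find? (fun p => !(p.2 == "rowheader") && pvMatchA (PySem.Str.lower w) p.2) = some z := by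
            simpa [List.find?_cons, hrow, hm] using hf
          cases hfi : List.findIdx? (fun w' => pvMatchA (PySem.Str.lower w') p.2) (w :: ws) with
          | none =>
              rw [pvCandsSome_cons_nomatch _ _ _ hrow hfi]
              exact ih hf'
          | some r =>
              have hr0 : r ≠ 0 := by
                rw [List.findIdx?_cons] at hfi
                simp only [hm, Bool.false_eq_true, if_false, Option.map_eq_some_iff] at hfi
                obtain ⟨r', -, hr'⟩ := hfi
                omega
              rw [pvCandsSome_cons_match _ _ _ r hrow hfi, List.find?_cons]
              have hne : (((r : Nat) : Int) == (0 : Int)) = false := by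
                simp
                omega
              rw [hne]
              exact ih hf'

-- when w matches nothing, the candidates for (w :: ws) are those for ws shifted by one
theorem pvCandsSome_shift (w : String) (ws : List String) (litems : List (Int × String))
    (hf : litems.find? (fun p => !(p.2 == "rowheader") && pvMatchA (PySem.Str.lower w) p.2) = none) :
    pvCandsSome (w :: ws) litems = pvShift (pvCandsSome ws litems) := by
  induction litems with
  | nil => rfl
  | cons p t ih =>
      rw [List.find?_cons] at hf
      by_cases hrow : p.2 = "rowheader"
      · simp only [hrow] at hf
        rw [pvCandsSome_cons_row _ _ _ hrow, pvCandsSome_cons_row ws _ _ hrow]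
        exact ih (by simpa using hf)
      · have hm : ¬ pvMatchA (PySem.Str.lower w) p.2 := by
          by_contra hm
          have hp : (!(p.2 == "rowheader") && pvMatchA (PySem.Str.lower w) p.2) = true := by
            simp [hrow, hm]
          simp [hp] at hf
        have hf' : t.find? (fun p => !(p.2 == "rowheader") && pvMatchA (PySem.Str.lower w) p.2) = none := by
          simpa [hrow, hm] using hf
        have hcons : List.findIdx? (fun w' => pvMatchA (PySem.Str.lower w') p.2) (w :: ws)
            = (List.findIdx? (fun w' => pvMatchA (PySem.Str.lower w') p.2) ws).map (fun i => i + 1) := by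
          simp [List.findIdx?_cons, hm]
        cases hfi : List.findIdx? (fun w' => pvMatchA (PySem.Str.lower w') p.2) ws with
        | none =>
            rw [pvCandsSome_cons_nomatch _ _ _ hrow (by rw [hcons, hfi]; rfl),
              pvCandsSome_cons_nomatch ws _ _ hrow hfi]
            exact ih hf'
        | some r =>
            rw [pvCandsSome_cons_match _ _ _ (r + 1) hrow (by rw [hcons, hfi]; rfl),
              pvCandsSome_cons_match ws _ _ r hrow hfi, ih hf']
            simp only [pvShift, List.map_cons]
            congr 1

theorem pvOuterA_eq_argmin (prefs : List String) (litems : List (Int × String)) :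
    pvOuterA prefs litems = pvArgminF (pvCandsSome prefs litems) := by
  induction prefs with
  | nil => simp [pvOuterA, pvCandsSome_nil, pvArgminF]
  | cons w ws ih =>
      rw [pvOuterA, pvInnerA_eq_find?]
      cases hf : litems.find? (fun p => !(p.2 == "rowheader") && pvMatchA (PySem.Str.lower w) p.2) with
      | some z =>
          simp only [Option.map_some]
          exact (pvArgminF_first_zero _ (0, z.1) (pvCandsSome_nonneg _ _)
            (pvCandsSome_find_zero w ws litems z hf)).symm
      | none =>
          simp only [Option.map_none]
          rw [pvCandsSome_shift w ws litems hf, pvArgminF_shift]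
          exact ih

-- full-pref candidates of the lowered items = B's candidates restricted to matched ranks
theorem pvCandsSome_full (items : List (Int × String)) :
    pvCandsSome pvFormatPreferenceA (items.map pvLowerSnd)
      = (pvCandsAll items).filter (fun q => decide (q.1 ≤ 9)) := by
  induction items with
  | nil => rfl
  | cons p t ih =>
      rw [List.map_cons]
      by_cases hrow : PySem.Str.lower p.2 = "rowheader"
      · rw [pvCandsSome_cons_row _ _ _ (by simpa [pvLowerSnd] using hrow),
          pvCandsAll_cons_row _ _ hrow]
        exact ih
      · rw [pvCandsAll_cons _ _ hrow, List.filter_cons, pvRankB_eq]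
        cases hfi : List.findIdx? (fun w => pvMatchA (PySem.Str.lower w) (PySem.Str.lower p.2)) pvFormatPreferenceA with
        | none =>
            rw [pvCandsSome_cons_nomatch _ _ _ (by simpa [pvLowerSnd] using hrow) (by simpa [pvLowerSnd] using hfi)]
            have h10 : (decide (((10 : Int)) ≤ 9)) = false := by decide
            simp only [h10, Bool.false_eq_true, if_false]
            exact ih
        | some r =>
            rw [pvCandsSome_cons_match _ _ _ r (by simpa [pvLowerSnd] using hrow) (by simpa [pvLowerSnd] using hfi)]
            have hr : r < 10 := by
              have := (List.findIdx?_eq_some_iff_findIdx_eq.mp hfi).1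
              simpa [pvFormatPreferenceA] using this
            have h9 : (decide (((r : Int)) ≤ 9)) = true := by simp; omega
            simp only [h9, if_true]
            rw [ih]
            rfl

-- A's fallback (first non-rowheader) = head of B's candidate list
theorem pvFallback_eq (items : List (Int × String)) :
    (((items.map pvLowerSnd).filter (fun p => !(p.2 == "rowheader"))).head?).map (fun p => p.1)
      = ((pvCandsAll items).head?).map (fun q => q.2) := by
  induction items with
  | nil => rfl
  | cons p t ih =>
      rw [List.map_cons, List.filter_cons]
      by_cases hrow : PySem.Str.lower p.2 = "rowheader"
      · rw [pvCandsAll_cons_row _ _ hrow]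
        simpa [pvLowerSnd, hrow] using ih
      · rw [pvCandsAll_cons _ _ hrow]
        simp [pvLowerSnd, hrow]

-- ===== VERDICT (by name: the statement is the Claim_ definition above) =====
theorem find_format_index_py_spec : Claim_equal_find_format_index_py := by
  intro headers _
  unfold Spec_find_format_index_py find_format_index_py find_format_index_py_alt
  by_cases hemp : headers.isEmpty
  · simp [hemp]
  · simp only [hemp, Bool.false_eq_true, if_false]
    rw [pvLower_enumerate, pvOuterA_eq_argmin, pvCandsSome_full]
    have hbd := pvCandsAll_bounds (PySem.List.enumerate headers 0)
    rw [pvScanB_eq_scanC]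
    have hmain := pvMain (pvCandsAll (PySem.List.enumerate headers 0)) hbd
    have hfb := pvFallback_eq (PySem.List.enumerate headers 0)
    cases hc : pvCandsAll (PySem.List.enumerate headers 0) with
    | nil =>
        rw [hc] at hfb
        simp only [List.filter_nil]
        have hh : ((List.map pvLowerSnd (PySem.List.enumerate headers 0)).filter
            (fun p => !(p.2 == "rowheader"))).head? = none := by
          simpa using hfb
        rw [hh]
        rfl
    | cons q cs =>
        rw [hc] at hmain hbd hfb
        have hq : q.1 < 11 := by have := hbd q (by simp); omega
        have hR : pvScanC (q :: cs) 11 none = some (pvAmGo cs q) := by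
          rw [pvScanC]
          simp only [hq, if_true]
          exact pvScanC_amGo cs q
        rw [hR, show some (pvAmGo cs q) = pvArgminF (q :: cs) from rfl, ← hmain]
        cases hfa : pvArgminF ((q :: cs).filter (fun q => decide (q.1 ≤ 9))) with
        | some i => simp only [hfa]
        | none =>
            simp only [hfa]
            have hfb' : (((List.map pvLowerSnd (PySem.List.enumerate headers 0)).filter
                (fun p => !(p.2 == "rowheader"))).head?).map (fun p => p.1) = some q.2 := by
              rw [hfb]; rfl
            cases hh : ((List.map pvLowerSnd (PySem.List.enumerate headers 0)).filter
                (fun p => !(p.2 == "rowheader"))).head? with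
            | none => rw [hh] at hfb'; simp at hfb'
            | some p =>
                rw [hh] at hfb'
                simp only [Option.map_some, Option.some.injEq] at hfb'
                simp [hfb']
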